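-- pv_equiv track=rewrite | github.com/GKRBROS/Pythonworkouts | try1.py | min_orbs
-- ===== SOURCE A (Python) =====
-- def min_orbs(recipes, target_potion):
--     from collections import defaultdict
--     import sys
--     recipe_dict = defaultdict(list)
--     for recipe in recipes:
--         potion, ingredients = recipe.split('=')
--         ingredients = ingredients.split('+')
--         recipe_dict[potion].append(ingredients)
--     memo = {}
--     def dfs(potion):
--         if potion not in recipe_dict:
--             return 0
--         if potion in memo:
--             return memo[potion]
--         min_orbs = sys.maxsize
--         for ingredients in recipe_dict[potion]:
--             orbs = len(ingredients) - 1
--             for ingredient in ingredients: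
--                 orbs += dfs(ingredient)
--             min_orbs = min(min_orbs, orbs)
--         memo[potion] = min_orbs
--         return min_orbs
--     return dfs(target_potion)
-- ===== SOURCE B (Python) =====
-- def min_orbs(recipes, target_potion):
--     entries = []
--     for recipe in recipes:
--         potion, rhs = recipe.split('=')
--         entries.append((potion, rhs.split('+')))
--     # Bellman-Ford-style relaxation from "infinity" (2**63 - 1 = sys.maxsize, A's sentinel), len(entries) rounds
--     cost = {potion: 2**63 - 1 for potion, _ in entries}
--     for _ in range(len(entries)):
--         for potion, ingredients in entries:
--             cand = len(ingredients) - 1 + sum(cost.get(c, 0) for c in ingredients)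
--             if cand < cost[potion]:
--                 cost[potion] = cand
--     return cost.get(target_potion, 0)
-- ===== Notes on version B (the rewrite author's own statement) =====
-- stated objective: alternative
-- what changed: Replaces the memoized recursive DFS over the recipe dict with an iterative Bellman-Ford-style relaxation: every potion starts at 2**63 - 1 (= sys.maxsize, the sentinel A uses) and len(entries) rounds of recipe relaxations converge to the minimum orb cost (no recursion, no memo dict).
import Mathlib
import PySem

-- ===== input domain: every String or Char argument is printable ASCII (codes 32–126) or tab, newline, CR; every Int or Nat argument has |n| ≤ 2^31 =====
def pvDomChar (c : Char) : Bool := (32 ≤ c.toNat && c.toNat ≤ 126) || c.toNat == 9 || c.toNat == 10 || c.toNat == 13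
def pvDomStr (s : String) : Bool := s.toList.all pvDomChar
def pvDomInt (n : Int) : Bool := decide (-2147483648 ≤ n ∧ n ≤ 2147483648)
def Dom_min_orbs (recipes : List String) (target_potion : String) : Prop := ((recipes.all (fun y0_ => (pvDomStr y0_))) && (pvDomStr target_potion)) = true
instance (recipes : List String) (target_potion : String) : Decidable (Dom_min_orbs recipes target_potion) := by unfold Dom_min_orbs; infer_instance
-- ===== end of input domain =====

-- B replaces A's memoized recursive DFS with an iterative Bellman-Ford-style relaxation
-- (alternative decomposition, similar cost); equivalence is proved on inputs where A returns.

-- ===== PORT A =====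
-- sys.maxsize (A's sentinel; B's Python writes the same value as the literal 2**63 - 1)
def pvMaxsize : Int := 9223372036854775807

-- A's unbounded Python recursion is ported with a fuel parameter; under Pre_ (the target's
-- dependency cone is acyclic) the fuel recipes.length + 1 used below is proved sufficient,
-- so fuel 0 is never reached.
def pvDfsA (rd : PySem.Dict String (List (List String))) :
    Nat → PySem.Dict String Int → String → Int × PySem.Dict String Int
  | 0, memo, _ => (0, memo)   -- fuel exhaustion; unreachable under Pre_
  | fuel+1, memo, potion =>
    if rd.contains potion = false then (0, memo)
    else
      match memo.get? potion with
      | some v => (v, memo)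
      | none =>
        let res := (rd.getD potion []).foldl
          (fun (acc : Int × PySem.Dict String Int) ingredients =>
            let inner := ingredients.foldl
              (fun (a : Int × PySem.Dict String Int) ingredient =>
                let r := pvDfsA rd fuel a.2 ingredient
                (a.1 + r.1, r.2))
              ((ingredients.length : Int) - 1, acc.2)
            (min acc.1 inner.1, inner.2))
          (pvMaxsize, memo)
        (res.1, res.2.insert potion res.1)

def min_orbs (recipes : List String) (target_potion : String) : Int :=
  let recipe_dict : PySem.Dict String (List (List String)) := recipes.foldl
    (fun d recipe =>
      match PySem.Str.split? recipe "=" with   -- sep "=" is non-empty: split? is always `some`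
      | some [potion, ingredients] => d.modify potion [] (· ++ [(PySem.Str.split? ingredients "+").getD []])
      | _ => d)   -- Python raises ValueError (unpacking) here; outside Pre_
    PySem.Dict.empty
  (pvDfsA recipe_dict (recipes.length + 1) PySem.Dict.empty target_potion).1

-- ===== PORT B =====
def min_orbs_alt (recipes : List String) (target_potion : String) : Int :=
  let entries : List (String × List String) := recipes.foldl
    (fun es recipe =>
      match PySem.Str.split? recipe "=" with   -- sep "=" is non-empty: split? is always `some`
      | none => es
      | some parts =>
        match parts with
        | [] => es   -- unreachable; Python raises ValueError (unpacking) unless exactly 2 parts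
        | potion :: rest =>
          match rest with
          | [] => es
          | rhs :: rest2 =>
            match rest2 with
            | [] => es ++ [(potion, (PySem.Str.split? rhs "+").getD [])]
            | _ :: _ => es)
    []
  let cost0 : PySem.Dict String Int :=
    entries.foldl (fun c e => c.insert e.1 (9223372036854775807 : Int)) PySem.Dict.empty
  let cost := (List.range entries.length).foldl
    (fun c _ => entries.foldl
      (fun (c : PySem.Dict String Int) e =>
        let cand := (e.2.length : Int) - 1 + e.2.foldl (fun s ch => s + c.getD ch 0) 0
        if cand < c.getD e.1 0 then c.insert e.1 cand else c)   -- cost[e.1]: e.1 is always a key of c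
      c)
    cost0
  cost.getD target_potion 0

-- ===== PRECONDITION & SPEC =====
-- Parsed (potion, ingredients) entries, in recipe order (shared by Pre_ and the proofs).
def pvEntries (recipes : List String) : List (String × List String) :=
  recipes.filterMap (fun r =>
    match PySem.Str.split? r "=" with
    | none => none
    | some parts =>
      match parts with
      | [] => none
      | p :: rest =>
        match rest with
        | [] => none
        | rhs :: rest2 =>
          match rest2 with
          | [] => some (p, (PySem.Str.split? rhs "+").getD [])
          | _ :: _ => none)

def pvIsKey (es : List (String × List String)) (p : String) : Bool :=
  es.any (fun e => e.1 == p)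

-- pvRankOk es r p: potion p can be fully resolved within r recursion levels of the dependency
-- graph (the standard bounded-depth characterisation of acyclicity of p's dependency cone).
def pvRankOk (es : List (String × List String)) : Nat → String → Bool
  | 0, _ => false
  | r+1, p => pvIsKey es p &&
      es.all (fun e => e.1 != p || e.2.all (fun c => !pvIsKey es c || pvRankOk es r c))

-- Pre_ excludes recipe strings that do not contain exactly one '=' (A raises ValueError while
-- unpacking) and targets from which a recipe cycle is reachable (A's recursion never bottoms
-- out there and raises RecursionError); cycles unreachable from the target stay inside Pre_.
def Pre_min_orbs (recipes : List String) (target_potion : String) : Prop :=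
  (∀ r ∈ recipes, ((PySem.Str.split? r "=").getD []).length = 2) ∧
  (pvIsKey (pvEntries recipes) target_potion = true →
    pvRankOk (pvEntries recipes) (pvEntries recipes).length target_potion = true)

instance (recipes : List String) (target_potion : String) :
    Decidable (Pre_min_orbs recipes target_potion) := by unfold Pre_min_orbs; infer_instance

def pvWitness_min_orbs : List String × String := (["p=a+b", "a=x+y"], "p")

def Spec_min_orbs (recipes : List String) (target_potion : String) (out : Int) : Prop :=
  out = min_orbs_alt recipes target_potion
instance (recipes : List String) (target_potion : String) (out : Int) :
    Decidable (Spec_min_orbs recipes target_potion out) := by unfold Spec_min_orbs; infer_instance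

-- ===== CLAIM (what is proved, stated in full; the proofs are below) =====
def Claim_equal_min_orbs : Prop := ∀ (recipes : List String) (target_potion : String),
  Dom_min_orbs recipes target_potion → Pre_min_orbs recipes target_potion →
  Spec_min_orbs recipes target_potion (min_orbs recipes target_potion)


-- ===== LEMMAS AND PROOFS =====

-- "Good" potions: those whose dependency cone is acyclic (resolvable within es.length levels).
def pvGood (es : List (String × List String)) (p : String) : Bool :=
  pvRankOk es es.length p

-- The exact cost function, defined with fuel; pvW is its value at sufficient fuel.
def pvWf (es : List (String × List String)) : Nat → String → Int
  | 0, _ => 0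
  | f+1, p => if pvIsKey es p then
      (es.filter (fun e => e.1 == p)).foldl
        (fun m e => min m ((e.2.length : Int) - 1 + (e.2.map (pvWf es f)).sum)) pvMaxsize
    else 0

def pvW (es : List (String × List String)) (p : String) : Int := pvWf es (es.length + 1) p

def pvRecMin (es : List (String × List String)) (g : String → Int) (p : String) : Int :=
  (es.filter (fun e => e.1 == p)).foldl
    (fun m e => min m ((e.2.length : Int) - 1 + (e.2.map g).sum)) pvMaxsize

def pvCostW (es : List (String × List String)) (ing : List String) : Int :=
  (ing.length : Int) - 1 + (ing.map (pvW es)).sum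

lemma pvRankOk_isKey {es : List (String × List String)} {r : Nat} {p : String}
    (h : pvRankOk es r p = true) : pvIsKey es p = true := by
  cases r with
  | zero => simp [pvRankOk] at h
  | succ r => exact (Bool.and_eq_true .. |>.mp h).1

lemma pvRankOk_child {es : List (String × List String)} {r : Nat} {p : String}
    {e : String × List String} {c : String}
    (h : pvRankOk es (r+1) p = true) (he : e ∈ es)
    (hfst : e.1 = p) (hc : c ∈ e.2) (hk : pvIsKey es c = true) : pvRankOk es r c = true := by
  have h2 := (Bool.and_eq_true .. |>.mp h).2
  rw [List.all_eq_true] at h2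
  have h3 := h2 e he
  rw [Bool.or_eq_true] at h3
  rcases h3 with h3 | h3
  · simp [hfst] at h3
  · rw [List.all_eq_true] at h3
    have h4 := h3 c hc
    rw [Bool.or_eq_true] at h4
    rcases h4 with h4 | h4
    · simp [hk] at h4
    · exact h4

lemma pvRankOk_succ {es : List (String × List String)} :
    ∀ {r : Nat} {p : String}, pvRankOk es r p = true → pvRankOk es (r+1) p = true := by
  intro r
  induction r with
  | zero => intro p h; simp [pvRankOk] at h
  | succ r ih =>
    intro p h
    have hk := pvRankOk_isKey h
    have h2 := (Bool.and_eq_true .. |>.mp h).2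
    rw [pvRankOk, Bool.and_eq_true]
    refine ⟨hk, ?_⟩
    rw [List.all_eq_true] at h2 ⊢
    intro e he
    have h3 := h2 e he
    rw [Bool.or_eq_true] at h3 ⊢
    rcases h3 with h3 | h3
    · exact Or.inl h3
    · refine Or.inr ?_
      rw [List.all_eq_true] at h3 ⊢
      intro c hc
      have h4 := h3 c hc
      rw [Bool.or_eq_true] at h4 ⊢
      rcases h4 with h4 | h4
      · exact Or.inl h4
      · exact Or.inr (ih h4)

lemma pvRankOk_mono {es : List (String × List String)} {r s : Nat} {p : String}
    (h : pvRankOk es r p = true) (hle : r ≤ s) : pvRankOk es s p = true := by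
  induction s with
  | zero =>
    have : r = 0 := by omega
    subst this; exact h
  | succ s ih =>
    by_cases hr : r = s + 1
    · subst hr; exact h
    · exact pvRankOk_succ (ih (by omega))

lemma pvGood_child {es : List (String × List String)} {e : String × List String} {c : String}
    (he : e ∈ es) (hg : pvGood es e.1 = true) (hc : c ∈ e.2) (hk : pvIsKey es c = true) :
    pvGood es c = true := by
  have hpos : 0 < es.length := List.length_pos_of_mem he
  obtain ⟨M, hM⟩ : ∃ M, es.length = M + 1 := ⟨es.length - 1, by omega⟩
  rw [pvGood, hM] at hg
  have := pvRankOk_child hg he rfl hc hk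
  rw [pvGood]
  exact pvRankOk_mono this (by omega)

lemma pvWf_nonkey {es : List (String × List String)} {p : String}
    (h : pvIsKey es p = false) (f : Nat) : pvWf es f p = 0 := by
  cases f with
  | zero => rfl
  | succ f => simp [pvWf, h]

lemma pvWf_succ (es : List (String × List String)) (f : Nat) (p : String) :
    pvWf es (f+1) p = if pvIsKey es p then pvRecMin es (pvWf es f) p else 0 := rfl

lemma pvWf_stable {es : List (String × List String)} :
    ∀ {r : Nat} {p : String}, pvRankOk es r p = true →
    ∀ {f g : Nat}, r ≤ f → r ≤ g → pvWf es f p = pvWf es g p := by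
  intro r
  induction r with
  | zero => intro p h; simp [pvRankOk] at h
  | succ r ih =>
    intro p h f g hf hg
    obtain ⟨f', rfl⟩ : ∃ f', f = f' + 1 := ⟨f - 1, by omega⟩
    obtain ⟨g', rfl⟩ : ∃ g', g = g' + 1 := ⟨g - 1, by omega⟩
    have hk := pvRankOk_isKey h
    rw [pvWf_succ, pvWf_succ, hk]; simp only [if_true]
    unfold pvRecMin
    apply PySem.List.foldl_congr_mem
    intro m e hme
    rw [List.mem_filter] at hme
    obtain ⟨hees, hbeq⟩ := hme
    have hfst : e.1 = p := by simpa using hbeq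
    congr 2
    congr 1
    apply List.map_congr_left
    intro c hc
    by_cases hkc : pvIsKey es c = true
    · exact ih (pvRankOk_child h hees hfst hc hkc) (by omega) (by omega)
    · rw [pvWf_nonkey (by simpa using hkc), pvWf_nonkey (by simpa using hkc)]

lemma pvW_nonkey {es : List (String × List String)} {p : String}
    (h : pvIsKey es p = false) : pvW es p = 0 := pvWf_nonkey h _

lemma pvW_key_eq {es : List (String × List String)} {r : Nat} {p : String}
    (hr : pvRankOk es r p = true) (hle : r ≤ es.length + 1) :
    pvW es p = pvRecMin es (pvW es) p := by
  have hk := pvRankOk_isKey hr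
  obtain ⟨r', rfl⟩ : ∃ r'', r = r'' + 1 := by
    cases r with
    | zero => simp [pvRankOk] at hr
    | succ r' => exact ⟨r', rfl⟩
  rw [pvW, pvWf_succ, hk]; simp only [if_true]
  unfold pvRecMin
  apply PySem.List.foldl_congr_mem
  intro m e hme
  rw [List.mem_filter] at hme
  obtain ⟨hees, hbeq⟩ := hme
  have hfst : e.1 = p := by simpa using hbeq
  congr 2
  congr 1
  apply List.map_congr_left
  intro c hc
  by_cases hkc : pvIsKey es c = true
  · have hrc := pvRankOk_child hr hees hfst hc hkc
    exact pvWf_stable hrc (by omega) (by omega)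
  · rw [pvWf_nonkey (by simpa using hkc), pvW_nonkey (by simpa using hkc)]

lemma pvRecMin_eq_foldl_min (es : List (String × List String)) (g : String → Int) (p : String) :
    pvRecMin es g p = (((es.filter (fun e => e.1 == p)).map
      (fun e => (e.2.length : Int) - 1 + (e.2.map g).sum)).foldl min pvMaxsize) := by
  rw [List.foldl_map]; rfl

lemma pvW_le_maxsize {es : List (String × List String)} {r : Nat} {p : String}
    (hr : pvRankOk es r p = true) (hle : r ≤ es.length + 1) :
    pvW es p ≤ pvMaxsize := by
  rw [pvW_key_eq hr hle, pvRecMin_eq_foldl_min]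
  exact (PySem.List.foldl_min_le _ _).1

lemma pvW_le_costW {es : List (String × List String)} {e : String × List String}
    (he : e ∈ es) (hg : pvGood es e.1 = true) :
    pvW es e.1 ≤ pvCostW es e.2 := by
  rw [pvW_key_eq hg (by omega), pvRecMin_eq_foldl_min]
  apply (PySem.List.foldl_min_le _ _).2
  rw [List.mem_map]
  exact ⟨e, List.mem_filter.mpr ⟨he, by simp⟩, rfl⟩

-- a value below pvMaxsize and below every recipe cost is below the min-fold
lemma le_min_foldl {v : Int} {l : List Int} : ∀ {a : Int}, v ≤ a → (∀ y ∈ l, v ≤ y) →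
    v ≤ l.foldl min a := by
  induction l with
  | nil => intro a ha _; exact ha
  | cons y t ih =>
    intro a ha h
    exact ih (le_min ha (h y (by simp))) (fun z hz => h z (by simp [hz]))

-- ---------- A side ----------

def pvDictA (recipes : List String) : PySem.Dict String (List (List String)) :=
  recipes.foldl
    (fun d recipe =>
      match PySem.Str.split? recipe "=" with
      | some [potion, ingredients] => d.modify potion [] (· ++ [(PySem.Str.split? ingredients "+").getD []])
      | _ => d)
    PySem.Dict.empty

lemma min_orbs_eq (recipes : List String) (t : String) :
    min_orbs recipes t = (pvDfsA (pvDictA recipes) (recipes.length + 1) PySem.Dict.empty t).1 := rfl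

def pvWF (recipes : List String) : Prop :=
  ∀ r ∈ recipes, ((PySem.Str.split? r "=").getD []).length = 2

lemma pvEntries_cons_of_wf {r : String} (h : ((PySem.Str.split? r "=").getD []).length = 2)
    (rest : List String) :
    ∃ a b, PySem.Str.split? r "=" = some [a, b] ∧
      pvEntries (r :: rest) = (a, (PySem.Str.split? b "+").getD []) :: pvEntries rest := by
  cases hsp : PySem.Str.split? r "=" with
  | none => rw [hsp] at h; simp at h
  | some l =>
    rw [hsp] at h
    simp only [Option.getD_some] at h
    match l, h with
    | [a, b], _ =>
      refine ⟨a, b, rfl, ?_⟩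
      simp [pvEntries, hsp]

lemma pvDictA_eq (recipes : List String) (hwf : pvWF recipes) :
    pvDictA recipes = (pvEntries recipes).foldl
      (fun d e => d.modify e.1 [] (· ++ [e.2])) PySem.Dict.empty := by
  have aux : ∀ (rs : List String), pvWF rs → ∀ (d : PySem.Dict String (List (List String))),
      rs.foldl
        (fun d recipe =>
          match PySem.Str.split? recipe "=" with
          | some [potion, ingredients] =>
              d.modify potion [] (· ++ [(PySem.Str.split? ingredients "+").getD []])
          | _ => d) d
      = (pvEntries rs).foldl (fun d e => d.modify e.1 [] (· ++ [e.2])) d := by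
    intro rs
    induction rs with
    | nil => intro _ d; simp [pvEntries]
    | cons r rest ih =>
      intro hwf d
      obtain ⟨a, b, hsp, hent⟩ := pvEntries_cons_of_wf (hwf r (by simp)) rest
      rw [hent]
      simp only [List.foldl_cons, hsp]
      exact ih (fun x hx => hwf x (by simp [hx])) _
  exact aux recipes hwf PySem.Dict.empty

lemma pvDictA_getD {recipes : List String} (hwf : pvWF recipes) (p : String) :
    (pvDictA recipes).getD p [] =
      ((pvEntries recipes).filter (fun e => e.1 == p)).map (·.2) := by
  rw [pvDictA_eq recipes hwf, PySem.Dict.getD_foldl_modify_append]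
  simp

lemma pvDictA_contains {recipes : List String} (hwf : pvWF recipes) (p : String) :
    (pvDictA recipes).contains p = pvIsKey (pvEntries recipes) p := by
  rw [pvDictA_eq recipes hwf]
  have hkeys : ((pvEntries recipes).foldl
      (fun d e => d.modify e.1 [] (· ++ [e.2])) PySem.Dict.empty).keys
      = PySem.Set.update (PySem.Dict.empty : PySem.Dict String (List (List String))).keys
          ((pvEntries recipes).map (·.1)) := by
    exact PySem.Dict.keys_foldl_modify_key (pvEntries recipes) (·.1) [] (fun _ e => (· ++ [e.2])) _
  have h1 : (((pvEntries recipes).foldl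
      (fun d e => d.modify e.1 [] (· ++ [e.2])) PySem.Dict.empty).contains p = true)
      ↔ (pvIsKey (pvEntries recipes) p = true) := by
    rw [PySem.Dict.contains_iff_mem_keys, hkeys]
    have : PySem.Set.update (PySem.Dict.empty : PySem.Dict String (List (List String))).keys
        ((pvEntries recipes).map (·.1)) = PySem.Set.ofList ((pvEntries recipes).map (·.1)) := rfl
    rw [this, PySem.Set.mem_ofList]
    simp [pvIsKey, List.any_eq_true, List.mem_map]
  cases hq : pvIsKey (pvEntries recipes) p with
  | true => exact h1.mpr hq
  | false => cases hc : (((pvEntries recipes).foldl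
      (fun d e => d.modify e.1 [] (· ++ [e.2])) PySem.Dict.empty).contains p) with
    | true => rw [h1.mp hc] at hq; cases hq
    | false => rfl

def pvMemoGood (es : List (String × List String)) (memo : PySem.Dict String Int) : Prop :=
  ∀ q v, memo.get? q = some v → v = pvW es q

lemma pvDfsA_inner {es : List (String × List String)} {rd : PySem.Dict String (List (List String))}
    {fuel : Nat} {C : String → Prop}
    (H : ∀ c (m0 : PySem.Dict String Int), C c → pvMemoGood es m0 →
      (pvDfsA rd fuel m0 c).1 = pvW es c ∧ pvMemoGood es (pvDfsA rd fuel m0 c).2) :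
    ∀ (ing : List String), (∀ c ∈ ing, C c) →
    ∀ (z : Int) (m0 : PySem.Dict String Int), pvMemoGood es m0 →
      (ing.foldl (fun (a : Int × PySem.Dict String Int) ingredient => (a.1 + (pvDfsA rd fuel a.2 ingredient).1, (pvDfsA rd fuel a.2 ingredient).2)) (z, m0)).1 = z + (ing.map (pvW es)).sum ∧
      pvMemoGood es ((ing.foldl (fun (a : Int × PySem.Dict String Int) ingredient => (a.1 + (pvDfsA rd fuel a.2 ingredient).1, (pvDfsA rd fuel a.2 ingredient).2)) (z, m0)).2) := by
  intro ing
  induction ing with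
  | nil => intro _ z m0 hm; exact ⟨by simp, hm⟩
  | cons c t ih =>
    intro hC z m0 hm
    simp only [List.foldl_cons]
    obtain ⟨h1, h2⟩ := H c m0 (hC c (by simp)) hm
    have hrest := ih (fun x hx => hC x (by simp [hx]))
      (z + (pvDfsA rd fuel m0 c).1) (pvDfsA rd fuel m0 c).2 h2
    refine ⟨?_, hrest.2⟩
    rw [hrest.1, h1, List.map_cons, List.sum_cons]
    ring

lemma pvDfsA_outer {es : List (String × List String)} {rd : PySem.Dict String (List (List String))}
    {fuel : Nat} {C : String → Prop}
    (H : ∀ c (m0 : PySem.Dict String Int), C c → pvMemoGood es m0 →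
      (pvDfsA rd fuel m0 c).1 = pvW es c ∧ pvMemoGood es (pvDfsA rd fuel m0 c).2) :
    ∀ (L : List (List String)), (∀ ing ∈ L, ∀ c ∈ ing, C c) →
    ∀ (m : Int) (m0 : PySem.Dict String Int), pvMemoGood es m0 →
      ((L.foldl (fun (acc : Int × PySem.Dict String Int) ingredients =>
            (min acc.1 (ingredients.foldl (fun (a : Int × PySem.Dict String Int) ingredient => (a.1 + (pvDfsA rd fuel a.2 ingredient).1, (pvDfsA rd fuel a.2 ingredient).2)) ((ingredients.length : Int) - 1, acc.2)).1,
             (ingredients.foldl (fun (a : Int × PySem.Dict String Int) ingredient => (a.1 + (pvDfsA rd fuel a.2 ingredient).1, (pvDfsA rd fuel a.2 ingredient).2)) ((ingredients.length : Int) - 1, acc.2)).2)) (m, m0)).1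
        = L.foldl (fun m ing => min m ((ing.length : Int) - 1 + (ing.map (pvW es)).sum)) m) ∧
      pvMemoGood es ((L.foldl (fun (acc : Int × PySem.Dict String Int) ingredients =>
            (min acc.1 (ingredients.foldl (fun (a : Int × PySem.Dict String Int) ingredient => (a.1 + (pvDfsA rd fuel a.2 ingredient).1, (pvDfsA rd fuel a.2 ingredient).2)) ((ingredients.length : Int) - 1, acc.2)).1,
             (ingredients.foldl (fun (a : Int × PySem.Dict String Int) ingredient => (a.1 + (pvDfsA rd fuel a.2 ingredient).1, (pvDfsA rd fuel a.2 ingredient).2)) ((ingredients.length : Int) - 1, acc.2)).2)) (m, m0)).2) := by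
  intro L
  induction L with
  | nil => intro _ m m0 hm; exact ⟨by simp, hm⟩
  | cons ing t ih =>
    intro hC m m0 hm
    simp only [List.foldl_cons]
    obtain ⟨h1, h2⟩ := pvDfsA_inner H ing (hC ing (by simp))
      ((ing.length : Int) - 1) m0 hm
    have hrest := ih (fun x hx => hC x (by simp [hx]))
      (min m (ing.foldl (fun (a : Int × PySem.Dict String Int) ingredient => (a.1 + (pvDfsA rd fuel a.2 ingredient).1, (pvDfsA rd fuel a.2 ingredient).2)) ((ing.length : Int) - 1, m0)).1)
      ((ing.foldl (fun (a : Int × PySem.Dict String Int) ingredient => (a.1 + (pvDfsA rd fuel a.2 ingredient).1, (pvDfsA rd fuel a.2 ingredient).2)) ((ing.length : Int) - 1, m0)).2) h2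
    refine ⟨?_, hrest.2⟩
    rw [hrest.1, h1]

lemma pvDfsA_correct {es : List (String × List String)} {rd : PySem.Dict String (List (List String))}
    (hget : ∀ p, rd.getD p [] = ((es.filter (fun e => e.1 == p)).map (·.2)))
    (hcon : ∀ p, rd.contains p = pvIsKey es p) :
    ∀ (fuel : Nat) (p : String) (memo : PySem.Dict String Int), pvMemoGood es memo →
      (pvIsKey es p = true → ∃ r, pvRankOk es r p = true ∧ r ≤ fuel ∧ r ≤ es.length + 1) →
      (pvDfsA rd fuel memo p).1 = pvW es p ∧ pvMemoGood es (pvDfsA rd fuel memo p).2 := by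
  intro fuel
  induction fuel with
  | zero =>
    intro p memo hmemo hrk
    have h0 : pvDfsA rd 0 memo p = (0, memo) := rfl
    rw [h0]
    refine ⟨?_, hmemo⟩
    by_cases hk : pvIsKey es p = true
    · obtain ⟨r, hr, hle, _⟩ := hrk hk
      have : r = 0 := by omega
      subst this
      simp [pvRankOk] at hr
    · exact (pvW_nonkey (by simpa using hk)).symm
  | succ fuel ih =>
    intro p memo hmemo hrk
    by_cases hk : pvIsKey es p = true
    case neg =>
      have hk' : pvIsKey es p = false := by simpa using hk
      have hstep : pvDfsA rd (fuel+1) memo p = (0, memo) := by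
        simp [pvDfsA, hcon p, hk']
      rw [hstep]
      exact ⟨(pvW_nonkey hk').symm, hmemo⟩
    case pos =>
      obtain ⟨r, hr, hle, hleN⟩ := hrk hk
      obtain ⟨r', rfl⟩ : ∃ r', r = r' + 1 := by
        cases r with
        | zero => simp [pvRankOk] at hr
        | succ r' => exact ⟨r', rfl⟩
      have hcontains : rd.contains p = true := by rw [hcon p]; exact hk
      have H : ∀ c (m0 : PySem.Dict String Int),
          (pvIsKey es c = true → pvRankOk es r' c = true) → pvMemoGood es m0 →
          (pvDfsA rd fuel m0 c).1 = pvW es c ∧ pvMemoGood es (pvDfsA rd fuel m0 c).2 := by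
        intro c m0 hc hm0
        exact ih c m0 hm0 (fun hkc => ⟨r', hc hkc, by omega, by omega⟩)
      have hchildren : ∀ ing ∈ rd.getD p [], ∀ c ∈ ing,
          (pvIsKey es c = true → pvRankOk es r' c = true) := by
        intro ing hing c hc hkc
        rw [hget p] at hing
        rw [List.mem_map] at hing
        obtain ⟨e, hef, rfl⟩ := hing
        rw [List.mem_filter] at hef
        exact pvRankOk_child hr hef.1 (by simpa using hef.2) hc hkc
      cases hm : memo.get? p with
      | some v =>
        have hstep : pvDfsA rd (fuel+1) memo p = (v, memo) := by
          simp [pvDfsA, hcontains, hm]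
        rw [hstep]
        exact ⟨hmemo p v hm, hmemo⟩
      | none =>
        obtain ⟨hv, hg⟩ := pvDfsA_outer H (rd.getD p []) hchildren pvMaxsize memo hmemo
        have hval : ((rd.getD p []).foldl (fun (acc : Int × PySem.Dict String Int) ingredients =>
            (min acc.1 (ingredients.foldl (fun (a : Int × PySem.Dict String Int) ingredient => (a.1 + (pvDfsA rd fuel a.2 ingredient).1, (pvDfsA rd fuel a.2 ingredient).2)) ((ingredients.length : Int) - 1, acc.2)).1,
             (ingredients.foldl (fun (a : Int × PySem.Dict String Int) ingredient => (a.1 + (pvDfsA rd fuel a.2 ingredient).1, (pvDfsA rd fuel a.2 ingredient).2)) ((ingredients.length : Int) - 1, acc.2)).2)) (pvMaxsize, memo)).1 = pvW es p := by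
          rw [hv, hget p, List.foldl_map]
          rw [pvW_key_eq hr hleN]
          rfl
        constructor
        · simp only [pvDfsA, hcontains, hm]
          exact hval
        · simp only [pvDfsA, hcontains, hm]
          intro q v hq
          rw [if_neg (by decide : ¬ (true = false))] at hq
          rw [PySem.Dict.get?_insert] at hq
          by_cases hqp : q = p
          · rw [if_pos hqp] at hq
            cases hq
            rw [hqp, hval]
          · rw [if_neg hqp] at hq
            exact hg q v hq

-- ---------- B side ----------

def pvStep (c : PySem.Dict String Int) (e : String × List String) : PySem.Dict String Int :=
  let cand := (e.2.length : Int) - 1 + e.2.foldl (fun s ch => s + c.getD ch 0) 0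
  if cand < c.getD e.1 0 then c.insert e.1 cand else c

def pvCost0 (es : List (String × List String)) : PySem.Dict String Int :=
  es.foldl (fun c e => c.insert e.1 pvMaxsize) PySem.Dict.empty

def pvRounds (es : List (String × List String)) (n : Nat) (c : PySem.Dict String Int) :
    PySem.Dict String Int :=
  (List.range n).foldl (fun c _ => es.foldl pvStep c) c

lemma pvEntriesB_eq {recipes : List String} (hwf : pvWF recipes)
    (acc : List (String × List String)) :
    recipes.foldl
      (fun es recipe =>
        match PySem.Str.split? recipe "=" with
        | none => es
        | some parts =>
          match parts with
          | [] => es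
          | potion :: rest =>
            match rest with
            | [] => es
            | rhs :: rest2 =>
              match rest2 with
              | [] => es ++ [(potion, (PySem.Str.split? rhs "+").getD [])]
              | _ :: _ => es) acc = acc ++ pvEntries recipes := by
  induction recipes generalizing acc with
  | nil => simp [pvEntries]
  | cons r rest ih =>
    obtain ⟨a, b, hsp, hent⟩ := pvEntries_cons_of_wf (hwf r (by simp)) rest
    rw [hent]
    simp only [List.foldl_cons, hsp]
    rw [ih (fun x hx => hwf x (by simp [hx]))]
    simp

lemma min_orbs_alt_eq (recipes : List String) (t : String) (hwf : pvWF recipes) :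
    min_orbs_alt recipes t =
      (pvRounds (pvEntries recipes) (pvEntries recipes).length
        (pvCost0 (pvEntries recipes))).getD t 0 := by
  unfold min_orbs_alt
  rw [pvEntriesB_eq hwf []]
  rfl

lemma pvCost0_get? (es : List (String × List String)) (p : String) :
    (pvCost0 es).get? p = if pvIsKey es p then some pvMaxsize else none := by
  have aux : ∀ (l : List (String × List String)) (c : PySem.Dict String Int),
      (l.foldl (fun c e => c.insert e.1 pvMaxsize) c).get? p
        = if pvIsKey l p then some pvMaxsize else c.get? p := by
    intro l
    induction l with
    | nil => intro c; simp [pvIsKey]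
    | cons e t ih =>
      intro c
      rw [List.foldl_cons, ih]
      by_cases ht : pvIsKey t p = true
      · have : pvIsKey (e :: t) p = true := by
          rw [pvIsKey, List.any_cons]; rw [pvIsKey] at ht; simp [ht]
        rw [ht, this]; simp
      · have ht' : pvIsKey t p = false := by simpa using ht
        rw [ht', PySem.Dict.get?_insert]
        by_cases hep : p = e.1
        · have : pvIsKey (e :: t) p = true := by
            rw [pvIsKey, List.any_cons]; simp [hep]
          rw [this]; simp [hep]
        · have : pvIsKey (e :: t) p = false := by
            rw [pvIsKey, List.any_cons]; rw [pvIsKey] at ht'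
            simp [ht']; exact fun h => hep h.symm
          rw [this]; simp [hep]
  exact aux es PySem.Dict.empty

-- the invariant: every stored value is ≤ maxsize; for potions with an acyclic cone it is ≥ pvW
def pvInv (es : List (String × List String)) (c : PySem.Dict String Int) : Prop :=
  (∀ p v, c.get? p = some v → v ≤ pvMaxsize ∧ (pvGood es p = true → pvW es p ≤ v)) ∧
  (∀ p, c.contains p = pvIsKey es p)

def pvExact (es : List (String × List String)) (k : Nat) (c : PySem.Dict String Int) : Prop :=
  ∀ p, pvRankOk es k p = true → c.get? p = some (pvW es p)

lemma pvStep_cand_ge {es : List (String × List String)} {c : PySem.Dict String Int}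
    {e : String × List String} (hInv : pvInv es c) (he : e ∈ es) (hg : pvGood es e.1 = true) :
    pvCostW es e.2 ≤ (e.2.length : Int) - 1 + e.2.foldl (fun s ch => s + c.getD ch 0) 0 := by
  obtain ⟨hlb, hconI⟩ := hInv
  unfold pvCostW
  rw [PySem.List.foldl_add (g := fun ch => c.getD ch 0)]
  have hsum : (e.2.map (pvW es)).sum ≤ (e.2.map (fun ch => c.getD ch 0)).sum := by
    apply List.sum_le_sum
    intro ch hch
    by_cases hkc : pvIsKey es ch = true
    · have hgc : pvGood es ch = true := pvGood_child he hg hch hkc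
      have hcc : c.contains ch = true := by rw [hconI ch]; exact hkc
      rw [PySem.Dict.contains_eq_isSome_get?] at hcc
      obtain ⟨v, hv⟩ := Option.isSome_iff_exists.mp hcc
      rw [PySem.Dict.getD_eq_get?_getD, hv]
      exact (hlb ch v hv).2 hgc
    · have hkc' : pvIsKey es ch = false := by simpa using hkc
      have hcc : c.contains ch = false := by rw [hconI ch]; exact hkc'
      rw [PySem.Dict.getD_of_not_contains _ _ hcc, pvW_nonkey hkc']
  omega

lemma pvStep_inv {es : List (String × List String)} {c : PySem.Dict String Int}
    {e : String × List String} (hInv : pvInv es c) (he : e ∈ es) :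
    pvInv es (pvStep c e) ∧
    (∀ q v', (pvStep c e).get? q = some v' → ∃ v, c.get? q = some v ∧ v' ≤ v) := by
  obtain ⟨hlb, hconI⟩ := hInv
  have hkey : pvIsKey es e.1 = true := by
    rw [pvIsKey, List.any_eq_true]; exact ⟨e, he, by simp⟩
  simp only [pvStep]
  by_cases hlt : ((e.2.length : Int) - 1 + e.2.foldl (fun s ch => s + c.getD ch 0) 0) < c.getD e.1 0
  case neg =>
    rw [if_neg hlt]
    exact ⟨⟨hlb, hconI⟩, fun q v' hq => ⟨v', hq, le_refl _⟩⟩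
  case pos =>
    rw [if_pos hlt]
    have hcc : c.contains e.1 = true := by rw [hconI e.1]; exact hkey
    rw [PySem.Dict.contains_eq_isSome_get?] at hcc
    obtain ⟨cur, hcur⟩ := Option.isSome_iff_exists.mp hcc
    have hcurD : c.getD e.1 0 = cur := by rw [PySem.Dict.getD_eq_get?_getD, hcur]; rfl
    rw [hcurD] at hlt
    have hcurB := (hlb e.1 cur hcur).1
    refine ⟨⟨?_, ?_⟩, ?_⟩
    · intro p v hv
      rw [PySem.Dict.get?_insert] at hv
      by_cases hpe : p = e.1
      · rw [if_pos hpe] at hv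
        cases hv
        subst hpe
        refine ⟨by omega, ?_⟩
        intro hgp
        exact le_trans (pvW_le_costW he hgp) (pvStep_cand_ge ⟨hlb, hconI⟩ he hgp)
      · rw [if_neg hpe] at hv
        exact hlb p v hv
    · intro p
      rw [PySem.Dict.contains_insert]
      by_cases hpe : p = e.1
      · subst hpe
        simp [hkey]
      · have : (p == e.1) = false := by simpa using hpe
        rw [this, Bool.false_or]
        exact hconI p
    · intro q v' hq
      rw [PySem.Dict.get?_insert] at hq
      by_cases hqe : q = e.1
      · rw [if_pos hqe] at hq
        cases hq
        subst hqe
        exact ⟨cur, hcur, by omega⟩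
      · rw [if_neg hqe] at hq
        exact ⟨v', hq, le_refl _⟩

lemma pvPass_inv {es : List (String × List String)} :
    ∀ (l : List (String × List String)) (_ : ∀ e ∈ l, e ∈ es) (c), pvInv es c →
      pvInv es (l.foldl pvStep c) ∧
      (∀ q v', (l.foldl pvStep c).get? q = some v' → ∃ v, c.get? q = some v ∧ v' ≤ v) := by
  intro l
  induction l with
  | nil => intro _ c h; exact ⟨h, fun q v' hq => ⟨v', hq, le_refl _⟩⟩
  | cons e t ih =>
    intro hsub c hInv
    rw [List.foldl_cons]
    obtain ⟨hInv', hdec'⟩ := pvStep_inv hInv (hsub e (by simp))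
    obtain ⟨hInv'', hdec''⟩ := ih (fun x hx => hsub x (by simp [hx])) _ hInv'
    refine ⟨hInv'', fun q v' hq => ?_⟩
    obtain ⟨v₁, hv₁, hle₁⟩ := hdec'' q v' hq
    obtain ⟨v₀, hv₀, hle₀⟩ := hdec' q v₁ hv₁
    exact ⟨v₀, hv₀, le_trans hle₁ hle₀⟩

lemma pvExact_mono {es : List (String × List String)} {k : Nat}
    {c c' : PySem.Dict String Int} (hkN : k ≤ es.length) (hInv' : pvInv es c')
    (hdec : ∀ q v', c'.get? q = some v' → ∃ v, c.get? q = some v ∧ v' ≤ v)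
    (hcon : ∀ p, c'.contains p = pvIsKey es p) (hk : pvExact es k c) : pvExact es k c' := by
  intro p hp
  have hsome := hk p hp
  have hkey : pvIsKey es p = true := pvRankOk_isKey hp
  have hgp : pvGood es p = true := pvRankOk_mono hp hkN
  have hc' : c'.contains p = true := by rw [hcon p]; exact hkey
  rw [PySem.Dict.contains_eq_isSome_get?] at hc'
  obtain ⟨v', hv'⟩ := Option.isSome_iff_exists.mp hc'
  obtain ⟨v, hv, hle⟩ := hdec p v' hv'
  rw [hsome] at hv
  cases hv
  have hge := (hInv'.1 p v' hv').2 hgp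
  rw [hv']
  congr 1
  omega

lemma pvPass_achieve {es : List (String × List String)} {p : String} {k : Nat}
    (hkN : k ≤ es.length) (hrank : pvRankOk es (k+1) p = true) :
    ∀ (l : List (String × List String)) (_ : ∀ e ∈ l, e ∈ es) (c), pvInv es c →
      pvExact es k c →
      ∀ e ∈ l, e.1 = p → (l.foldl pvStep c).getD p 0 ≤ pvCostW es e.2 := by
  intro l
  induction l with
  | nil => intro _ c _ _ e he; cases he
  | cons h t ih =>
    intro hsub c hInv hEx e he hefst
    rw [List.foldl_cons]
    obtain ⟨hInv', hdec'⟩ := pvStep_inv hInv (hsub h (by simp))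
    have hEx' : pvExact es k (pvStep c h) := pvExact_mono hkN hInv' hdec' hInv'.2 hEx
    rcases List.mem_cons.mp he with rfl | het
    · -- e is the head entry; the update bounds the value by e's exact recipe cost
      have hees : e ∈ es := hsub e (by simp)
      have hcand : (e.2.length : Int) - 1 + e.2.foldl (fun s ch => s + c.getD ch 0) 0
          = pvCostW es e.2 := by
        unfold pvCostW
        rw [PySem.List.foldl_add (g := fun ch => c.getD ch 0)]
        have : e.2.map (fun ch => c.getD ch 0) = e.2.map (pvW es) := by
          apply List.map_congr_left
          intro ch hch
          by_cases hkc : pvIsKey es ch = true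
          · have hrc := pvRankOk_child hrank hees hefst hch hkc
            rw [PySem.Dict.getD_eq_get?_getD, hEx ch hrc]; rfl
          · have hkc' : pvIsKey es ch = false := by simpa using hkc
            have hcc : c.contains ch = false := by rw [hInv.2 ch]; exact hkc'
            rw [PySem.Dict.getD_of_not_contains _ _ hcc, pvW_nonkey hkc']
        rw [this]
        omega
      have hstep_le : (pvStep c e).getD p 0 ≤ pvCostW es e.2 := by
        simp only [pvStep]
        by_cases hlt : ((e.2.length : Int) - 1 + e.2.foldl (fun s ch => s + c.getD ch 0) 0) < c.getD e.1 0
        · rw [if_pos hlt, hefst, PySem.Dict.getD_insert]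
          rw [if_pos rfl, ← hcand]
        · rw [if_neg hlt]
          rw [← hcand, ← hefst]
          omega
      -- the remaining fold never increases the value at p
      obtain ⟨hInvT, hdecT⟩ := pvPass_inv t (fun x hx => hsub x (by simp [hx])) _ hInv'
      have hkeyp : pvIsKey es p = true := by
        rw [pvIsKey, List.any_eq_true]; exact ⟨e, hees, by simp [hefst]⟩
      have hcT : (t.foldl pvStep (pvStep c e)).contains p = true := by
        rw [hInvT.2 p]; exact hkeyp
      rw [PySem.Dict.contains_eq_isSome_get?] at hcT
      obtain ⟨v', hv'⟩ := Option.isSome_iff_exists.mp hcT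
      obtain ⟨v, hv, hle⟩ := hdecT p v' hv'
      rw [PySem.Dict.getD_eq_get?_getD, hv']
      have : (pvStep c e).getD p 0 = v := by rw [PySem.Dict.getD_eq_get?_getD, hv]; rfl
      rw [this] at hstep_le
      calc (some v').getD 0 = v' := rfl
        _ ≤ v := hle
        _ ≤ pvCostW es e.2 := hstep_le
    · exact ih (fun x hx => hsub x (by simp [hx])) _ hInv' hEx' e het hefst

lemma pvRound {es : List (String × List String)} {c : PySem.Dict String Int} {k : Nat}
    (hkN : k + 1 ≤ es.length) (hInv : pvInv es c) (hEx : pvExact es k c) :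
    pvInv es (es.foldl pvStep c) ∧ pvExact es (k+1) (es.foldl pvStep c) := by
  obtain ⟨hInv', hdec'⟩ := pvPass_inv es (fun _ he => he) c hInv
  refine ⟨hInv', ?_⟩
  intro p hp
  have hkey := pvRankOk_isKey hp
  have hgp : pvGood es p = true := pvRankOk_mono hp hkN
  have hc' : (es.foldl pvStep c).contains p = true := by rw [hInv'.2 p]; exact hkey
  rw [PySem.Dict.contains_eq_isSome_get?] at hc'
  obtain ⟨v, hv⟩ := Option.isSome_iff_exists.mp hc'
  have hge := (hInv'.1 p v hv).2 hgp
  have hub := (hInv'.1 p v hv).1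
  have hle : v ≤ pvW es p := by
    rw [pvW_key_eq hp (by omega), pvRecMin_eq_foldl_min]
    apply le_min_foldl hub
    intro y hy
    rw [List.mem_map] at hy
    obtain ⟨e, hef, rfl⟩ := hy
    rw [List.mem_filter] at hef
    have hach := pvPass_achieve (by omega) hp es (fun _ he => he) c hInv hEx e hef.1 (by simpa using hef.2)
    rw [PySem.Dict.getD_eq_get?_getD, hv] at hach
    exact hach
  rw [hv]
  congr 1
  omega

lemma pvRounds_correct {es : List (String × List String)} {c : PySem.Dict String Int}
    (hInv : pvInv es c) :
    ∀ n, n ≤ es.length → pvInv es (pvRounds es n c) ∧ pvExact es n (pvRounds es n c) := by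
  intro n
  induction n with
  | zero => intro _; exact ⟨hInv, fun p hp => by simp [pvRankOk] at hp⟩
  | succ n ih =>
    intro hn
    have hstep : pvRounds es (n+1) c = es.foldl pvStep (pvRounds es n c) := by
      unfold pvRounds
      rw [List.range_succ, List.foldl_append]
      rfl
    rw [hstep]
    obtain ⟨h1, h2⟩ := ih (by omega)
    exact pvRound hn h1 h2

lemma pvCost0_inv (es : List (String × List String)) : pvInv es (pvCost0 es) := by
  constructor
  · intro p v hv
    rw [pvCost0_get? es p] at hv
    by_cases hk : pvIsKey es p = true
    · rw [hk] at hv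
      simp only [if_true] at hv
      cases hv
      exact ⟨le_refl _, fun hgp => pvW_le_maxsize hgp (by omega)⟩
    · have hk' : pvIsKey es p = false := by simpa using hk
      rw [hk'] at hv
      cases hv
  · intro p
    rw [PySem.Dict.contains_eq_isSome_get?, pvCost0_get? es p]
    by_cases hk : pvIsKey es p = true
    · rw [hk]; simp
    · have hk' : pvIsKey es p = false := by simpa using hk
      rw [hk']; simp

-- ===== VERDICT (by name: the statement is the Claim_ definition above) =====
theorem min_orbs_spec : Claim_equal_min_orbs := by
  intro recipes t _hdom hpre
  unfold Spec_min_orbs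
  obtain ⟨hwf, htgt⟩ := hpre
  have hwf' : pvWF recipes := hwf
  have hlen : (pvEntries recipes).length ≤ recipes.length := by
    rw [pvEntries]
    exact List.length_filterMap_le _ _
  have hAresult : min_orbs recipes t = pvW (pvEntries recipes) t := by
    rw [min_orbs_eq]
    refine (pvDfsA_correct (es := pvEntries recipes) (rd := pvDictA recipes)
      (fun p => pvDictA_getD hwf' p) (fun p => pvDictA_contains hwf' p)
      (recipes.length + 1) t PySem.Dict.empty ?memo ?rk).1
    case memo =>
      intro q v hq
      rw [PySem.Dict.get?_empty] at hq
      cases hq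
    case rk =>
      intro hk
      exact ⟨(pvEntries recipes).length, htgt hk, by omega, by omega⟩
  have hBresult : min_orbs_alt recipes t = pvW (pvEntries recipes) t := by
    rw [min_orbs_alt_eq recipes t hwf']
    obtain ⟨hInv, hEx⟩ := pvRounds_correct (pvCost0_inv (pvEntries recipes))
      (pvEntries recipes).length (le_refl _)
    by_cases hk : pvIsKey (pvEntries recipes) t = true
    · rw [PySem.Dict.getD_eq_get?_getD, hEx t (htgt hk)]
      rfl
    · have hk' : pvIsKey (pvEntries recipes) t = false := by simpa using hk
      have hc : (pvRounds (pvEntries recipes) (pvEntries recipes).length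
          (pvCost0 (pvEntries recipes))).contains t = false := by
        rw [hInv.2 t]; exact hk'
      rw [PySem.Dict.getD_of_not_contains _ _ hc, pvW_nonkey hk']
  rw [hAresult, hBresult]
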